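-- pv_equiv track=rewrite | github.com/hoya54/BOJ | 9205_BFS.py | find
-- ===== SOURCE A (Python) =====
-- import copy
--
-- def dist(a, b, x, y):
--     return abs(a-x) + abs(b-y)
--
-- def find(x, y, dx, dy, bottles, stores):
--     # 바로 갈 수 있다면
--     if dist(x, y, dx, dy) <= bottles*50:
--         return True
--
--     # 바로는 못감, 편의점 들러야함
--     for i in range(len(stores)):
--         sx, sy, visited = stores[i][0], stores[i][1], stores[i][2]
--         if visited == 1:
--             continue
--
--         if dist(x, y, sx, sy) <= bottles*50:
--             copied_stores = copy.deepcopy(stores)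
--             copied_stores[i][2] = 1
--             result = find(sx, sy, dx, dy, 20, copied_stores)
--             if result == True:
--                 return True
--
--     return False
-- ===== SOURCE B (Python) =====
-- def dist(a, b, x, y):
--     return abs(a - x) + abs(b - y)
--
-- def find(x, y, dx, dy, bottles, stores):
--     # direct hop
--     if dist(x, y, dx, dy) <= bottles * 50:
--         return True
--     # reachability saturation over the proximity graph of unvisited stores
--     pts = [(r[0], r[1]) for r in stores if r[2] != 1]
--     n = len(pts)
--     reach = [dist(x, y, px, py) <= bottles * 50 for (px, py) in pts]
--     for _ in range(n):
--         reach = [reach[j] or any(reach[i] and dist(pts[i][0], pts[i][1], pts[j][0], pts[j][1]) <= 1000 for i in range(n)) for j in range(n)]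
--     return any(reach[i] and dist(pts[i][0], pts[i][1], dx, dy) <= 1000 for i in range(n))
-- ===== Notes on version B (the rewrite author's own statement) =====
-- stated objective: faster
-- what changed: Replaces A's exponential branching recursion (which deepcopies the store list to track per-path visited marks) by a one-shot reachability saturation over the proximity graph of the unvisited stores: mark every store within bottles*50 of the start, close under edges of Manhattan length <= 1000, and test whether a reached store is within 1000 of the destination.
-- outside the precondition, e.g. on find(0, 0, 2000, 0, 20, [[600, 0, 0], [1500, 0, 0], [0]]): A returns True, B raises IndexError
import Mathlib
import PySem

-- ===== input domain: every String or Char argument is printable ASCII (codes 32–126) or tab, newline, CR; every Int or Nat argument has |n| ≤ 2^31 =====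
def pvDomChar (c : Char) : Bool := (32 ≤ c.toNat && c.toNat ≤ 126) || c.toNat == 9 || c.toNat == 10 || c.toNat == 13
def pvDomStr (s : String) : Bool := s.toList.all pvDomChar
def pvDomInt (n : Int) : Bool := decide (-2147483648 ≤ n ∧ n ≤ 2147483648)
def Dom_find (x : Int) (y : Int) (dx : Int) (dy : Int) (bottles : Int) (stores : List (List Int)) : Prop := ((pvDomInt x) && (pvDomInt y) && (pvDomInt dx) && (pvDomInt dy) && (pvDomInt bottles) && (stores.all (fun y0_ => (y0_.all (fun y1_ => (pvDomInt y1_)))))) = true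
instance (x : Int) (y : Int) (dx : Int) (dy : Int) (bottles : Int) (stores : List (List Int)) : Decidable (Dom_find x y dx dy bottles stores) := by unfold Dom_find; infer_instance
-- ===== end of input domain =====

-- B replaces A's branching recursion (which deepcopies the store list to track per-path visited
-- marks) by a reachability saturation over the proximity graph of the unvisited stores.

-- ===== PORT A =====
def distA (a b x y : Int) : Int := |a - x| + |b - y|

-- A's recursion is made total with fuel; depth is bounded by the number of unvisited stores,
-- so fuel = stores.length + 1 always suffices (the guard is fuel only, no algorithm switch).
def findFuel : Nat → Int → Int → Int → Int → Int → List (List Int) → Bool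
  | 0, _, _, _, _, _, _ => false
  | (fuel+1), x, y, dx, dy, bottles, stores =>
    if distA x y dx dy ≤ bottles * 50 then true
    else
      (List.range stores.length).any fun i =>
        let r := (PySem.List.pyGet? stores (i : Int)).getD []
        let sx := (PySem.List.pyGet? r 0).getD 0
        let sy := (PySem.List.pyGet? r 1).getD 0
        let visited := (PySem.List.pyGet? r 2).getD 0
        if visited == 1 then false
        else if distA x y sx sy ≤ bottles * 50 then
          findFuel fuel sx sy dx dy 20 (stores.set i (r.set 2 1))
        else false

def find (x : Int) (y : Int) (dx : Int) (dy : Int) (bottles : Int) (stores : List (List Int)) : Bool :=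
  findFuel (stores.length + 1) x y dx dy bottles stores

-- ===== PORT B =====
def distB (a b x y : Int) : Int := |a - x| + |b - y|

def unvisitedB (r : List Int) : Bool := !((PySem.List.pyGet? r 2).getD 0 == 1)

def coordB (r : List Int) : Int × Int := ((PySem.List.pyGet? r 0).getD 0, (PySem.List.pyGet? r 1).getD 0)

-- pts = [(r[0], r[1]) for r in stores if r[2] != 1]
def ptsOf (stores : List (List Int)) : List (Int × Int) := (stores.filter unvisitedB).map coordB

-- one saturation round of Source B's loop body
def stepB (pts : List (Int × Int)) (reach : List Bool) : List Bool :=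
  (List.range pts.length).map fun j =>
    reach.getD j false ||
      (List.range pts.length).any fun i =>
        reach.getD i false &&
          decide (distB (pts.getD i (0,0)).1 (pts.getD i (0,0)).2 (pts.getD j (0,0)).1 (pts.getD j (0,0)).2 ≤ 1000)

def find_alt (x : Int) (y : Int) (dx : Int) (dy : Int) (bottles : Int) (stores : List (List Int)) : Bool :=
  if distB x y dx dy ≤ bottles * 50 then true
  else
    let pts := ptsOf stores
    let n := pts.length
    let init := pts.map fun p => decide (distB x y p.1 p.2 ≤ bottles * 50)
    let reach := (List.range n).foldl (fun acc _ => stepB pts acc) init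
    (List.range n).any fun i =>
      reach.getD i false && decide (distB (pts.getD i (0,0)).1 (pts.getD i (0,0)).2 dx dy ≤ 1000)

-- ===== PRECONDITION & SPEC =====
-- Pre_ excludes the inputs where the destination is not directly reachable and some store row has
-- fewer than 3 entries: on those Python B always raises IndexError (it scans every row), and
-- Python A either raises IndexError too or returns True only because its search happens to
-- succeed before reaching the short row.
def Pre_find (x : Int) (y : Int) (dx : Int) (dy : Int) (bottles : Int) (stores : List (List Int)) : Prop :=
  |x - dx| + |y - dy| ≤ bottles * 50 ∨ ∀ r ∈ stores, 3 ≤ r.length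
instance (x : Int) (y : Int) (dx : Int) (dy : Int) (bottles : Int) (stores : List (List Int)) : Decidable (Pre_find x y dx dy bottles stores) := by unfold Pre_find; infer_instance

def pvWitness_find : Int × Int × Int × Int × Int × List (List Int) :=
  (0, 0, 2000, 0, 1, [[600, 0, 0], [1200, 0, 0]])

def Spec_find (x : Int) (y : Int) (dx : Int) (dy : Int) (bottles : Int) (stores : List (List Int)) (out : Bool) : Prop := out = find_alt x y dx dy bottles stores
instance (x : Int) (y : Int) (dx : Int) (dy : Int) (bottles : Int) (stores : List (List Int)) (out : Bool) : Decidable (Spec_find x y dx dy bottles stores out) := by unfold Spec_find; infer_instance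

-- ===== CLAIM (what is proved, stated in full; the proofs are below) =====
def Claim_equal_find : Prop := ∀ (x : Int) (y : Int) (dx : Int) (dy : Int) (bottles : Int) (stores : List (List Int)), Dom_find x y dx dy bottles stores → Pre_find x y dx dy bottles stores → Spec_find x y dx dy bottles stores (find x y dx dy bottles stores)

-- ===== LEMMAS AND PROOFS =====

-- A chain of intermediate store coordinates from (x,y) to (dx,dy): every hop within the current
-- limit (bottles*50 at the start, 20*50 = 1000 after every store).
def Chain (dx dy : Int) : Int → Int → Int → List (Int × Int) → Prop
  | x, y, lim, [] => |x - dx| + |y - dy| ≤ lim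
  | x, y, lim, q :: qs => |x - q.1| + |y - q.2| ≤ lim ∧ Chain dx dy q.1 q.2 1000 qs

-- the same chain without the final hop to the destination
def Hops : Int → Int → Int → List (Int × Int) → Prop
  | _, _, _, [] => True
  | x, y, lim, q :: qs => |x - q.1| + |y - q.2| ≤ lim ∧ Hops q.1 q.2 1000 qs

-- stores reachable from (x,y) in at most k+1 hops (the mathematical meaning of B's k-th round)
def RB (x y b : Int) (pts : List (Int × Int)) : Nat → Int × Int → Prop
  | 0, q => |x - q.1| + |y - q.2| ≤ b * 50
  | k+1, q => RB x y b pts k q ∨ ∃ p ∈ pts, RB x y b pts k p ∧ |p.1 - q.1| + |p.2 - q.2| ≤ 1000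

lemma mem_ptsOf_iff (l : List (List Int)) (q : Int × Int) :
    q ∈ ptsOf l ↔ ∃ (i : Nat) (r : List Int), l[i]? = some r ∧ unvisitedB r = true ∧ coordB r = q := by
  constructor
  · intro h
    simp only [ptsOf, List.mem_map, List.mem_filter] at h
    obtain ⟨r, ⟨hrl, hru⟩, hc⟩ := h
    obtain ⟨i, hi⟩ := List.mem_iff_getElem?.mp hrl
    exact ⟨i, r, hi, hru, hc⟩
  · rintro ⟨i, r, hi, hru, hc⟩
    simp only [ptsOf, List.mem_map, List.mem_filter]
    exact ⟨r, ⟨List.mem_of_getElem? hi, hru⟩, hc⟩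

lemma filter_length_set (l : List (List Int)) (i : Nat) (r w : List Int)
    (hi : l[i]? = some r) (hr : unvisitedB r = true) (hw : unvisitedB w = false) :
    ((l.set i w).filter unvisitedB).length + 1 = (l.filter unvisitedB).length := by
  induction l generalizing i with
  | nil => simp at hi
  | cons h t ih =>
    cases i with
    | zero =>
      simp only [List.getElem?_cons_zero, Option.some.injEq] at hi
      subst hi
      simp [hr, hw]
    | succ i =>
      simp only [List.getElem?_cons_succ] at hi
      have := ih i hi
      by_cases hu : unvisitedB h = true <;> simp [hu, this]

lemma unvisitedB_mark (r : List Int) (h3 : 3 ≤ r.length) : unvisitedB (r.set 2 1) = false := by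
  have h2 : (r.set 2 1)[2]? = some 1 := List.getElem?_set_self (by omega)
  simp [unvisitedB, pysem, h2]

lemma ptsOf_set_subset (l : List (List Int)) (i : Nat) (r : List Int)
    (hi : l[i]? = some r) (h3 : 3 ≤ r.length) :
    ∀ q ∈ ptsOf (l.set i (r.set 2 1)), q ∈ ptsOf l := by
  intro q hq
  rw [mem_ptsOf_iff] at hq ⊢
  obtain ⟨j, r', hj, hu, hc⟩ := hq
  by_cases hji : j = i
  · subst hji
    rw [List.getElem?_set_self ((List.getElem?_eq_some_iff.mp hi).1)] at hj
    cases hj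
    rw [unvisitedB_mark r h3] at hu
    exact absurd hu (by simp)
  · rw [List.getElem?_set_ne (Ne.symm hji)] at hj
    exact ⟨j, r', hj, hu, hc⟩

lemma mem_ptsOf_set (l : List (List Int)) (i : Nat) (r : List Int)
    (hi : l[i]? = some r) (q' : Int × Int) (hne : q' ≠ coordB r)
    (hq' : q' ∈ ptsOf l) : q' ∈ ptsOf (l.set i (r.set 2 1)) := by
  rw [mem_ptsOf_iff] at hq' ⊢
  obtain ⟨j, r', hj, hu, hc⟩ := hq'
  by_cases hji : j = i
  · subst hji
    rw [hi] at hj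
    cases hj
    exact absurd hc.symm hne
  · refine ⟨j, r', ?_, hu, hc⟩
    rw [List.getElem?_set_ne (Ne.symm hji)]
    exact hj

lemma chainTail (dx dy : Int) : ∀ (v : List (Int × Int)) (x y lim : Int) (i : Int × Int) (w : List (Int × Int)),
    Chain dx dy x y lim (v ++ i :: w) → Chain dx dy i.1 i.2 1000 w := by
  intro v
  induction v with
  | nil => intro x y lim i w h; exact h.2
  | cons a v ih => intro x y lim i w h; exact ih a.1 a.2 1000 i w h.2

lemma chainDedup (dx dy : Int) : ∀ (p : List (Int × Int)) (x y lim : Int),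
    Chain dx dy x y lim p → ∃ q, q.Nodup ∧ (∀ a ∈ q, a ∈ p) ∧ Chain dx dy x y lim q := by
  suffices H : ∀ (n : Nat) (p : List (Int × Int)), p.length ≤ n → ∀ (x y lim : Int),
      Chain dx dy x y lim p → ∃ q, q.Nodup ∧ (∀ a ∈ q, a ∈ p) ∧ Chain dx dy x y lim q by
    intro p x y lim h
    exact H p.length p le_rfl x y lim h
  intro n
  induction n with
  | zero =>
    intro p hp x y lim h
    have : p = [] := List.eq_nil_of_length_eq_zero (Nat.le_zero.mp hp)
    subst this
    exact ⟨[], by simp, by simp, h⟩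
  | succ n ih =>
    intro p hp x y lim h
    match p with
    | [] => exact ⟨[], by simp, by simp, h⟩
    | q0 :: t =>
      by_cases hmem : q0 ∈ t
      · obtain ⟨v, w, rfl⟩ := List.mem_iff_append.mp hmem
        have h3 : Chain dx dy q0.1 q0.2 1000 w := chainTail dx dy v q0.1 q0.2 1000 q0 w h.2
        have hlen : (q0 :: w).length ≤ n := by
          simp only [List.length_cons, List.length_append] at hp ⊢
          omega
        obtain ⟨q, hq1, hq2, hq3⟩ := ih (q0 :: w) hlen x y lim ⟨h.1, h3⟩
        refine ⟨q, hq1, ?_, hq3⟩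
        intro a ha
        have := hq2 a ha
        simp only [List.mem_cons, List.mem_append] at this ⊢
        tauto
      · have hlen : t.length ≤ n := by simp only [List.length_cons] at hp; omega
        obtain ⟨q, hq1, hq2, hq3⟩ := ih t hlen q0.1 q0.2 1000 h.2
        refine ⟨q0 :: q, ?_, ?_, ⟨h.1, hq3⟩⟩
        · exact List.nodup_cons.mpr ⟨fun hc => hmem (hq2 _ hc), hq1⟩
        · intro a ha
          rcases List.mem_cons.mp ha with rfl | ha'
          · exact List.mem_cons_self
          · exact List.mem_cons_of_mem _ (hq2 a ha')

lemma nodup_length_le {α : Type} [DecidableEq α] (q pts : List α) (h : q.Nodup) (hs : ∀ a ∈ q, a ∈ pts) :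
    q.length ≤ pts.length := by
  calc q.length = q.toFinset.card := (List.toFinset_card_of_nodup h).symm
    _ ≤ pts.toFinset.card := Finset.card_le_card (fun a ha => by
        simp only [List.mem_toFinset] at *; exact hs a ha)
    _ ≤ pts.length := pts.toFinset_card_le

lemma hops_extend : ∀ (u : List (Int × Int)) (x y lim : Int) (p q : Int × Int),
    Hops x y lim (u ++ [p]) → |p.1 - q.1| + |p.2 - q.2| ≤ 1000 → Hops x y lim (u ++ [p, q]) := by
  intro u
  induction u with
  | nil => intro x y lim p q h he; exact ⟨h.1, he, trivial⟩
  | cons a u ih => intro x y lim p q h he; exact ⟨h.1, ih a.1 a.2 1000 p q h.2 he⟩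

lemma hops_split : ∀ (u : List (Int × Int)) (x y lim : Int) (p q : Int × Int),
    Hops x y lim (u ++ [p, q]) → Hops x y lim (u ++ [p]) ∧ |p.1 - q.1| + |p.2 - q.2| ≤ 1000 := by
  intro u
  induction u with
  | nil => intro x y lim p q h; exact ⟨⟨h.1, trivial⟩, h.2.1⟩
  | cons a u ih =>
    intro x y lim p q h
    obtain ⟨h1, h2⟩ := ih a.1 a.2 1000 p q h.2
    exact ⟨⟨h.1, h1⟩, h2⟩

lemma chain_iff_hops (dx dy : Int) : ∀ (u : List (Int × Int)) (x y lim : Int) (q : Int × Int),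
    Chain dx dy x y lim (u ++ [q]) ↔ Hops x y lim (u ++ [q]) ∧ |q.1 - dx| + |q.2 - dy| ≤ 1000 := by
  intro u
  induction u with
  | nil =>
    intro x y lim q
    constructor
    · intro h; exact ⟨⟨h.1, trivial⟩, h.2⟩
    · intro h; exact ⟨h.1.1, h.2⟩
  | cons a u ih =>
    intro x y lim q
    constructor
    · intro h
      obtain ⟨h1, h2⟩ := (ih a.1 a.2 1000 q).mp h.2
      exact ⟨⟨h.1, h1⟩, h2⟩
    · intro h
      exact ⟨h.1.1, (ih a.1 a.2 1000 q).mpr ⟨h.1.2, h.2⟩⟩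

lemma RB_mono_le (x y b : Int) (pts : List (Int × Int)) (q : Int × Int) :
    ∀ (m k : Nat), k ≤ m → RB x y b pts k q → RB x y b pts m q := by
  intro m
  induction m with
  | zero => intro k hk h; rw [Nat.le_zero.mp hk] at h; exact h
  | succ m ih =>
    intro k hk h
    rcases Nat.eq_or_lt_of_le hk with rfl | hlt
    · exact h
    · exact Or.inl (ih k (Nat.lt_succ_iff.mp hlt) h)

lemma RChar (x y b : Int) (pts : List (Int × Int)) :
    ∀ (k : Nat) (q : Int × Int), RB x y b pts k q ↔
      ∃ u, u.length ≤ k ∧ (∀ a ∈ u, a ∈ pts) ∧ Hops x y (b * 50) (u ++ [q]) := by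
  intro k
  induction k with
  | zero =>
    intro q
    constructor
    · intro h; exact ⟨[], by simp, by simp, ⟨h, trivial⟩⟩
    · rintro ⟨u, hlen, _, hH⟩
      have hu : u = [] := List.eq_nil_of_length_eq_zero (Nat.le_zero.mp hlen)
      subst hu
      exact hH.1
  | succ k ih =>
    intro q
    constructor
    · rintro (h | ⟨p, hp, hk, hedge⟩)
      · obtain ⟨u, h1, h2, h3⟩ := (ih q).mp h
        exact ⟨u, Nat.le_succ_of_le h1, h2, h3⟩
      · obtain ⟨u, h1, h2, h3⟩ := (ih p).mp hk
        refine ⟨u ++ [p], by simp; omega, ?_, ?_⟩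
        · intro a ha
          rcases List.mem_append.mp ha with ha' | ha'
          · exact h2 a ha'
          · rw [List.mem_singleton.mp ha']; exact hp
        · have := hops_extend u x y (b * 50) p q h3 hedge
          simpa [List.append_assoc] using this
    · rintro ⟨u, hlen, hmem, hH⟩
      rcases List.eq_nil_or_concat u with rfl | ⟨v, p, rfl⟩
      · exact RB_mono_le x y b pts q (k + 1) 0 (Nat.zero_le _) hH.1
      · rw [List.concat_eq_append, List.append_assoc] at hH
        obtain ⟨hH', hedge⟩ := hops_split v x y (b * 50) p q (by simpa using hH)
        refine Or.inr ⟨p, hmem p (by simp), ?_, hedge⟩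
        refine (ih p).mpr ⟨v, ?_, fun a ha => hmem a (by simp [ha]), hH'⟩
        simp only [List.concat_eq_append, List.length_append, List.length_singleton] at hlen
        omega

lemma AChar (dx dy : Int) : ∀ (fuel : Nat) (stores : List (List Int)) (x y b : Int),
    (∀ r ∈ stores, 3 ≤ r.length) → (ptsOf stores).length < fuel →
    (findFuel fuel x y dx dy b stores = true ↔
      ∃ qs, (∀ q ∈ qs, q ∈ ptsOf stores) ∧ Chain dx dy x y (b * 50) qs) := by
  intro fuel
  induction fuel with
  | zero => intro stores x y b _ hlt; exact absurd hlt (Nat.not_lt_zero _)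
  | succ fuel ih =>
    intro stores x y b hpre hlt
    by_cases hdir : distA x y dx dy ≤ b * 50
    · constructor
      · intro _
        exact ⟨[], by simp, by simpa [Chain, distA] using hdir⟩
      · intro _
        simp [findFuel, hdir]
    · have hstep : findFuel (fuel + 1) x y dx dy b stores =
          (List.range stores.length).any fun i =>
            let r := (PySem.List.pyGet? stores (i : Int)).getD []
            let sx := (PySem.List.pyGet? r 0).getD 0
            let sy := (PySem.List.pyGet? r 1).getD 0
            let visited := (PySem.List.pyGet? r 2).getD 0
            if visited == 1 then false
            else if distA x y sx sy ≤ b * 50 then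
              findFuel fuel sx sy dx dy 20 (stores.set i (r.set 2 1))
            else false := by
        simp only [findFuel, if_neg hdir]
      rw [hstep, List.any_eq_true]
      constructor
      · rintro ⟨i, hi_mem, hbody⟩
        have hi : i < stores.length := List.mem_range.mp hi_mem
        obtain ⟨r, hr⟩ : ∃ r, stores[i]? = some r := ⟨stores[i], List.getElem?_eq_getElem hi⟩
        simp only [PySem.List.pyGet?_natCast, hr, Option.getD_some] at hbody
        by_cases hv : ((PySem.List.pyGet? r 2).getD 0 == 1) = true
        · simp [hv] at hbody
        · simp only [hv, Bool.false_eq_true, if_false] at hbody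
          by_cases hnear : distA x y ((PySem.List.pyGet? r 0).getD 0) ((PySem.List.pyGet? r 1).getD 0) ≤ b * 50
          · simp only [if_pos hnear] at hbody
            have hru : unvisitedB r = true := by simp [unvisitedB, hv]
            have h3 : 3 ≤ r.length := hpre r (List.mem_of_getElem? hr)
            have hpre' : ∀ r' ∈ stores.set i (r.set 2 1), 3 ≤ r'.length := by
              intro r' hr'
              rcases List.mem_or_eq_of_mem_set hr' with h | rfl
              · exact hpre _ h
              · simpa using h3
            have hcount : (ptsOf (stores.set i (r.set 2 1))).length + 1 = (ptsOf stores).length := by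
              simpa [ptsOf, List.length_map] using
                filter_length_set stores i r (r.set 2 1) hr hru (unvisitedB_mark r h3)
            obtain ⟨qs', hmem', hch'⟩ :=
              (ih (stores.set i (r.set 2 1)) ((PySem.List.pyGet? r 0).getD 0)
                ((PySem.List.pyGet? r 1).getD 0) 20 hpre' (by omega)).mp hbody
            refine ⟨coordB r :: qs', ?_, ?_⟩
            · intro a ha
              rcases List.mem_cons.mp ha with rfl | ha'
              · exact (mem_ptsOf_iff stores _).mpr ⟨i, r, hr, hru, rfl⟩
              · exact ptsOf_set_subset stores i r hr h3 a (hmem' a ha')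
            · exact ⟨by simpa [distA, coordB] using hnear, by simpa [coordB] using hch'⟩
          · simp [hnear] at hbody
      · rintro ⟨qs0, hmem0, hch0⟩
        obtain ⟨qs, hnd, hsub, hch⟩ := chainDedup dx dy qs0 x y (b * 50) hch0
        have hmem : ∀ a ∈ qs, a ∈ ptsOf stores := fun a ha => hmem0 a (hsub a ha)
        match qs, hnd, hmem, hch with
        | [], _, _, hch => exact absurd (by simpa [Chain, distA] using hch) hdir
        | q :: qs', hnd, hmem, hch =>
          obtain ⟨i, r, hr, hru, hcoord⟩ := (mem_ptsOf_iff stores q).mp (hmem q List.mem_cons_self)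
          have hi : i < stores.length := (List.getElem?_eq_some_iff.mp hr).1
          refine ⟨i, List.mem_range.mpr hi, ?_⟩
          simp only [PySem.List.pyGet?_natCast, hr, Option.getD_some]
          have hv : ((PySem.List.pyGet? r 2).getD 0 == 1) = false := by
            revert hru
            simp [unvisitedB]
          rw [hv]
          simp only [Bool.false_eq_true, if_false]
          have hcq : ((PySem.List.pyGet? r 0).getD 0, (PySem.List.pyGet? r 1).getD 0) = q := hcoord
          have hnear : distA x y ((PySem.List.pyGet? r 0).getD 0) ((PySem.List.pyGet? r 1).getD 0) ≤ b * 50 := by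
            have := hch.1
            rw [← hcq] at this
            simpa [distA] using this
          rw [if_pos hnear]
          have h3 : 3 ≤ r.length := hpre r (List.mem_of_getElem? hr)
          have hpre' : ∀ r' ∈ stores.set i (r.set 2 1), 3 ≤ r'.length := by
            intro r' hr'
            rcases List.mem_or_eq_of_mem_set hr' with h | rfl
            · exact hpre _ h
            · simpa using h3
          have hcount : (ptsOf (stores.set i (r.set 2 1))).length + 1 = (ptsOf stores).length := by
            simpa [ptsOf, List.length_map] using
              filter_length_set stores i r (r.set 2 1) hr hru (unvisitedB_mark r h3)
          refine (ih (stores.set i (r.set 2 1)) _ _ 20 hpre' (by omega)).mpr ⟨qs', ?_, ?_⟩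
          · intro a ha
            refine mem_ptsOf_set stores i r hr a ?_ (hmem a (List.mem_cons_of_mem _ ha))
            intro hac
            rw [hac, hcoord] at ha
            exact (List.nodup_cons.mp hnd).1 ha
          · have := hch.2
            rw [← hcq] at this
            simpa using this

lemma foldl_range_const {α : Type} (k : Nat) (f : α → α) (a : α) :
    (List.range k).foldl (fun s _ => f s) a = f^[k] a := by
  induction k generalizing a with
  | zero => simp
  | succ k ih => simp [List.range_succ, Function.iterate_succ_apply', ih]

lemma reachIter (x y b : Int) (pts : List (Int × Int)) :
    ∀ (k : Nat),
      ((stepB pts)^[k] (pts.map fun p => decide (distB x y p.1 p.2 ≤ b * 50))).length = pts.length ∧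
      ∀ (j : Nat) (hj : j < pts.length),
        (((stepB pts)^[k] (pts.map fun p => decide (distB x y p.1 p.2 ≤ b * 50))).getD j false = true
          ↔ RB x y b pts k pts[j]) := by
  intro k
  induction k with
  | zero =>
    refine ⟨by simp, ?_⟩
    intro j hj
    rw [Function.iterate_zero_apply, PySem.List.getD_map_of_lt _ pts j false hj]
    simp [RB, distB]
  | succ k ih =>
    obtain ⟨ihlen, ihiff⟩ := ih
    rw [Function.iterate_succ_apply']
    constructor
    · simp [stepB]
    · intro j hj
      rw [show (stepB pts ((stepB pts)^[k] (pts.map fun p => decide (distB x y p.1 p.2 ≤ b * 50)))) =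
          (List.range pts.length).map _ from rfl,
        PySem.List.getD_map_range _ pts.length j false hj]
      simp only [Bool.or_eq_true, List.any_eq_true, List.mem_range, Bool.and_eq_true,
        decide_eq_true_eq]
      constructor
      · rintro (h | ⟨i, hi, hri, hd⟩)
        · exact Or.inl ((ihiff j hj).mp h)
        · refine Or.inr ⟨pts[i], List.getElem_mem hi, (ihiff i hi).mp hri, ?_⟩
          rw [List.getD_eq_getElem pts (0,0) hi, List.getD_eq_getElem pts (0,0) hj] at hd
          simpa [distB] using hd
      · rintro (h | ⟨p, hp, hrp, hd⟩)
        · exact Or.inl ((ihiff j hj).mpr h)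
        · obtain ⟨i, hi, rfl⟩ := List.mem_iff_getElem.mp hp
          refine Or.inr ⟨i, hi, (ihiff i hi).mpr hrp, ?_⟩
          rw [List.getD_eq_getElem pts (0,0) hi, List.getD_eq_getElem pts (0,0) hj]
          simpa [distB] using hd

lemma BChar (x y dx dy b : Int) (stores : List (List Int)) (hdir : ¬ distB x y dx dy ≤ b * 50) :
    (find_alt x y dx dy b stores = true ↔
      ∃ (i : Nat) (hi : i < (ptsOf stores).length),
        RB x y b (ptsOf stores) (ptsOf stores).length (ptsOf stores)[i] ∧
        |((ptsOf stores)[i]).1 - dx| + |((ptsOf stores)[i]).2 - dy| ≤ 1000) := by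
  simp only [find_alt, if_neg hdir]
  rw [foldl_range_const]
  simp only [List.any_eq_true, List.mem_range, Bool.and_eq_true, decide_eq_true_eq]
  obtain ⟨hlen, hiff⟩ := reachIter x y b (ptsOf stores) (ptsOf stores).length
  constructor
  · rintro ⟨i, hi, hr, hd⟩
    refine ⟨i, hi, (hiff i hi).mp hr, ?_⟩
    rw [List.getD_eq_getElem _ (0,0) hi] at hd
    simpa [distB] using hd
  · rintro ⟨i, hi, hr, hd⟩
    refine ⟨i, hi, (hiff i hi).mpr hr, ?_⟩
    rw [List.getD_eq_getElem _ (0,0) hi]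
    simpa [distB] using hd

-- ===== VERDICT (by name: the statement is the Claim_ definition above) =====
theorem find_spec : Claim_equal_find := by
  intro x y dx dy b stores _ hpre
  show find x y dx dy b stores = find_alt x y dx dy b stores
  by_cases hdir : distB x y dx dy ≤ b * 50
  · have hA : find x y dx dy b stores = true := by
      simp [find, findFuel, show distA x y dx dy ≤ b * 50 from hdir]
    have hB : find_alt x y dx dy b stores = true := by simp [find_alt, hdir]
    rw [hA, hB]
  · rw [Bool.eq_iff_iff]
    have hplen : (ptsOf stores).length ≤ stores.length := by
      simp only [ptsOf, List.length_map]
      exact List.length_filter_le _ _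
    have hrows : ∀ r ∈ stores, 3 ≤ r.length := hpre.resolve_left hdir
    have hA := AChar dx dy (stores.length + 1) stores x y b hrows (by omega)
    have hB := BChar x y dx dy b stores hdir
    rw [show find x y dx dy b stores = findFuel (stores.length + 1) x y dx dy b stores from rfl,
      hA, hB]
    constructor
    · rintro ⟨qs0, hmem0, hch0⟩
      obtain ⟨qs, hnd, hsub, hch⟩ := chainDedup dx dy qs0 x y (b * 50) hch0
      have hmem : ∀ a ∈ qs, a ∈ ptsOf stores := fun a ha => hmem0 a (hsub a ha)
      rcases List.eq_nil_or_concat qs with rfl | ⟨u, q, rfl⟩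
      · exact absurd (by simpa [Chain, distB] using hch) hdir
      · rw [List.concat_eq_append] at hch hnd hmem
        have hch' := (chain_iff_hops dx dy u x y (b * 50) q).mp hch
        have hq : q ∈ ptsOf stores := hmem q (by simp)
        obtain ⟨i, hi, hqi⟩ := List.mem_iff_getElem.mp hq
        refine ⟨i, hi, ?_, ?_⟩
        · apply (RChar x y b (ptsOf stores) (ptsOf stores).length _).mpr
          refine ⟨u, ?_, fun a ha => hmem a (by simp [ha]), by rw [hqi]; exact hch'.1⟩
          have hql : (u ++ [q]).length ≤ (ptsOf stores).length :=
            nodup_length_le _ _ hnd hmem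
          simp only [List.length_append, List.length_singleton] at hql
          omega
        · rw [hqi]; exact hch'.2
    · rintro ⟨i, hi, hr, hd⟩
      obtain ⟨u, _, humem, huH⟩ := (RChar x y b (ptsOf stores) _ _).mp hr
      refine ⟨u ++ [(ptsOf stores)[i]], ?_, ?_⟩
      · intro a ha
        rcases List.mem_append.mp ha with ha' | ha'
        · exact humem a ha'
        · rw [List.mem_singleton.mp ha']; exact List.getElem_mem hi
      · exact (chain_iff_hops dx dy u x y (b * 50) _).mpr ⟨huH, hd⟩
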